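-- pv_equiv track=rewrite | github.com/MohamedMolecule/Estimation-Calculator | application.py | onlywinlose
-- ===== SOURCE A (Python) =====
-- def onlywinlose(win):
--     wins = 0
--     loses = 0
--     indexwinlose = [10, 10]
--     for i in range(4):
--         if win[i] == True:
--             wins += 1
--         if win[i] == False:
--             loses += 1
--     if wins == 1:
--         for i in range(4):
--             if win[i] == True:
--                 indexwinlose[0] = i
--     if loses == 1:
--         for i in range(4):
--             if win[i] == False:
--                 indexwinlose[1] = i
--     return indexwinlose
-- ===== SOURCE B (Python) =====
-- def onlywinlose(win):
--     # one pass: count wins/losses and remember the last matching index as we go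
--     wins = 0
--     loses = 0
--     last_true = 10
--     last_false = 10
--     for i in range(4):
--         if win[i] == True:
--             wins += 1
--             last_true = i
--         if win[i] == False:
--             loses += 1
--             last_false = i
--     return [last_true if wins == 1 else 10, last_false if loses == 1 else 10]
-- ===== Notes on version B (the rewrite author's own statement) =====
-- stated objective: simpler
-- what changed: B makes one fused pass over range(4) that counts wins/losses and records the last true/false index, instead of A's counting pass followed by two conditional rescans and in-place list updates.
import Mathlib
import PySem

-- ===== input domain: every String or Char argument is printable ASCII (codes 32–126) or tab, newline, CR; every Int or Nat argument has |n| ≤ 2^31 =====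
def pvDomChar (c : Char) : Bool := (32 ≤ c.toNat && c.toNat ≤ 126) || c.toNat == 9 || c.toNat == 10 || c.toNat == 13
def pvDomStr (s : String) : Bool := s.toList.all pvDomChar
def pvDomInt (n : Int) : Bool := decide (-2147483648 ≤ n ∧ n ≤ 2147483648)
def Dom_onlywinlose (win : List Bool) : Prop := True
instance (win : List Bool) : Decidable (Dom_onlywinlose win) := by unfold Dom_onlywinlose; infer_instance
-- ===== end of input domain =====

-- B fuses A's three passes over range(4) into one pass that counts and records last indices.
-- ===== PORT A =====
def onlywinlose (win : List Bool) : List Int :=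
  let counts := (PySem.List.pyRange 0 4 1).foldl
    (fun (wl : Int × Int) i =>
      let wl := if PySem.List.pyGetD win i false == true then (wl.1 + 1, wl.2) else wl
      if PySem.List.pyGetD win i false == false then (wl.1, wl.2 + 1) else wl)
    (0, 0)
  let idx : List Int := [10, 10]
  let idx := if counts.1 == 1 then
      (PySem.List.pyRange 0 4 1).foldl
        (fun a i => if PySem.List.pyGetD win i false == true then PySem.List.pySetD a 0 i else a) idx
    else idx
  let idx := if counts.2 == 1 then
      (PySem.List.pyRange 0 4 1).foldl
        (fun a i => if PySem.List.pyGetD win i false == false then PySem.List.pySetD a 1 i else a) idx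
    else idx
  idx

-- ===== PORT B =====
def onlywinlose_alt (win : List Bool) : List Int :=
  let st := (PySem.List.pyRange 0 4 1).foldl
    (fun (s : Int × Int × Int × Int) i =>
      let s := if PySem.List.pyGetD win i false == true then (s.1 + 1, s.2.1, i, s.2.2.2) else s
      if PySem.List.pyGetD win i false == false then (s.1, s.2.1 + 1, s.2.2.1, i) else s)
    (0, 0, 10, 10)
  [if st.1 == 1 then st.2.2.1 else 10, if st.2.1 == 1 then st.2.2.2 else 10]

-- ===== PRECONDITION & SPEC =====
-- Pre_: the Python A raises IndexError unless win has at least the four indexed elements.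
def Pre_onlywinlose (win : List Bool) : Prop := 4 ≤ win.length
instance (win : List Bool) : Decidable (Pre_onlywinlose win) := by unfold Pre_onlywinlose; infer_instance
def pvWitness_onlywinlose : List Bool := [true, false, false, false]
def Spec_onlywinlose (win : List Bool) (out : List Int) : Prop := out = onlywinlose_alt win
instance (win : List Bool) (out : List Int) : Decidable (Spec_onlywinlose win out) := by unfold Spec_onlywinlose; infer_instance

-- ===== CLAIM (what is proved, stated in full; the proofs are below) =====
def Claim_equal_onlywinlose : Prop := ∀ (win : List Bool), Dom_onlywinlose win → Pre_onlywinlose win → Spec_onlywinlose win (onlywinlose win)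

-- ===== LEMMAS AND PROOFS =====

-- ===== VERDICT (by name: the statement is the Claim_ definition above) =====
theorem onlywinlose_spec : Claim_equal_onlywinlose := by
  intro win _ hpre
  unfold Pre_onlywinlose at hpre
  obtain ⟨a, b, c, d, t, rfl⟩ : ∃ a b c d t, win = a :: b :: c :: d :: t := by
    match win, hpre with
    | a :: b :: c :: d :: t, _ => exact ⟨a, b, c, d, t, rfl⟩
  unfold Spec_onlywinlose
  cases a <;> cases b <;> cases c <;> cases d <;>
    simp [onlywinlose, onlywinlose_alt, show PySem.List.pyRange 0 4 1 = [0, 1, 2, 3] from by decide,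
      List.foldl, PySem.List.pyGetD_ofNat'] <;> decide
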